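-- pv_equiv track=rewrite | github.com/harkib/GoogleFoobar | level3b.py | relocateState
-- ===== SOURCE A (Python) =====
-- def relocateState(m, i0, iNew):
--     assert iNew < i0 #only for moving state up and shifting down
--
--     # shift rows
--     temp = m[i0]
--     for  i in range(i0,iNew,-1): m[i] = m[i-1]
--     m[iNew] = temp
--
--     # shift cols
--     for row in m:
--         temp = row[i0]
--         for  i in range(i0,iNew,-1): row[i] = row[i-1]
--         row[iNew] = temp
--
--     return m
-- ===== SOURCE B (Python) =====
-- def relocateState(m, i0, iNew):
--     assert 0 <= iNew < i0 #only for moving a state up (valid row index) and shifting down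
--     # The relocation is the permutation src on indices: position iNew takes the
--     # old i0, positions iNew+1..i0 take their left neighbour, the rest are fixed.
--     # Apply it to rows and columns at once in a nested comprehension.
--     def src(j):
--         if j == iNew:
--             return i0
--         if iNew < j <= i0:
--             return j - 1
--         return j
--     return [[m[src(r)][src(c)] for c in range(len(m[src(r)]))]
--             for r in range(len(m))]
-- ===== Notes on version B (the rewrite author's own statement) =====
-- stated objective: alternative
-- what changed: A moves the state by two in-place element-shifting loops (rows, then each row's columns); B computes the index permutation src once and rebuilds the matrix in a single nested comprehension m[src(r)][src(c)], with no shifting or mutation.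
-- outside the precondition, e.g. on relocateState([[1, 2], [3, 4]], 1, -1): A returns [[1, 2], [3, 4]], B raises AssertionError
import Mathlib
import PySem

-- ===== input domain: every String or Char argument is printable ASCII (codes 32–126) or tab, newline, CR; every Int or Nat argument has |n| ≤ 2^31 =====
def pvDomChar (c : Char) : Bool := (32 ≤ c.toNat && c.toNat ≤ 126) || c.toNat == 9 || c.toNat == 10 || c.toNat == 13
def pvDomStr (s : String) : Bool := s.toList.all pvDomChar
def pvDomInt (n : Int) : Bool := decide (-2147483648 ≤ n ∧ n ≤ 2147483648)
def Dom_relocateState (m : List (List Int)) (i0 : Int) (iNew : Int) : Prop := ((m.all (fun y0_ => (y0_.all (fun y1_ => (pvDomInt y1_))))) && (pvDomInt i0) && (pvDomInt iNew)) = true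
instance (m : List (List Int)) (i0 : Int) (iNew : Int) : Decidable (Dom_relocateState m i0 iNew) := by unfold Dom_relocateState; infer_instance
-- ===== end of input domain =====

-- B replaces A's two in-place element-shifting loops by one nested comprehension reading
-- through an index permutation (alternative decomposition, same cost). A mutates m (and its
-- rows) in place in Python, B builds a fresh matrix: the equivalence proved is about the return value.

-- ===== PORT A =====
-- A's shift pattern (temp = xs[i0]; for i in range(i0, iNew, -1): xs[i] = xs[i-1]; xs[iNew] = temp),
-- written once and used for the row shift and for each row's column shift, exactly as A's code repeats it.
def pyShiftA {α : Type} [Inhabited α] (xs : List α) (i0 : Int) (iNew : Int) : List α :=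
  let temp := PySem.List.pyGetD xs i0 default
  let xs := (PySem.List.pyRange i0 iNew (-1)).foldl
      (fun s i => PySem.List.pySetD s i (PySem.List.pyGetD s (i-1) default)) xs
  PySem.List.pySetD xs iNew temp

def relocateState (m : List (List Int)) (i0 : Int) (iNew : Int) : List (List Int) :=
  let m1 := pyShiftA m i0 iNew
  m1.map (fun row => pyShiftA row i0 iNew)

-- ===== PORT B =====
-- B's helper src(j): the index permutation applied to rows and columns.
def srcIdx (i0 : Int) (iNew : Int) (j : Int) : Int :=
  if j = iNew then i0
  else if iNew < j ∧ j ≤ i0 then j - 1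
  else j

-- B's nested comprehension [[m[src(r)][src(c)] for c in range(len(m[src(r)]))] for r in range(len(m))].
def relocateState_alt (m : List (List Int)) (i0 : Int) (iNew : Int) : List (List Int) :=
  (PySem.List.pyRange 0 (m.length : Int) 1).map (fun r =>
    let row := PySem.List.pyGetD m (srcIdx i0 iNew r) []
    (PySem.List.pyRange 0 (row.length : Int) 1).map (fun c =>
      PySem.List.pyGetD row (srcIdx i0 iNew c) 0))

-- ===== PRECONDITION & SPEC =====
-- Pre_ excludes: iNew ≥ i0 (A's assert fails), i0 out of range (IndexError), and negative
-- indices: there A still returns via Python's negative-index wraparound inside the shift loop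
-- while B wraps via its permutation — on that corner both values are accidents of negative-index
-- semantics that nobody would specify, so it is excluded.
def Pre_relocateState (m : List (List Int)) (i0 : Int) (iNew : Int) : Prop :=
  0 ≤ iNew ∧ iNew < i0 ∧ i0 < (m.length : Int) ∧ ∀ row ∈ m, i0 < (row.length : Int)
instance (m : List (List Int)) (i0 : Int) (iNew : Int) : Decidable (Pre_relocateState m i0 iNew) := by unfold Pre_relocateState; infer_instance

def pvWitness_relocateState : List (List Int) × Int × Int := ([[1, 2], [3, 4]], 1, 0)

def Spec_relocateState (m : List (List Int)) (i0 : Int) (iNew : Int) (out : List (List Int)) : Prop := out = relocateState_alt m i0 iNew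
instance (m : List (List Int)) (i0 : Int) (iNew : Int) (out : List (List Int)) : Decidable (Spec_relocateState m i0 iNew out) := by unfold Spec_relocateState; infer_instance

-- ===== CLAIM (what is proved, stated in full; the proofs are below) =====
def Claim_equal_relocateState : Prop := ∀ (m : List (List Int)) (i0 : Int) (iNew : Int), Dom_relocateState m i0 iNew → Pre_relocateState m i0 iNew → Spec_relocateState m i0 iNew (relocateState m i0 iNew)

-- ===== LEMMAS AND PROOFS =====

-- The closed form of A's shift loop (before the final xs[iNew] = temp write):
-- positions a+1 … a+d receive xs[a … a+d-1], everything else is unchanged.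
theorem fold_shift_closed {α : Type} [Inhabited α] (d : Nat) :
    ∀ (xs : List α) (a : Nat), 0 < d → a + d < xs.length →
    (PySem.List.pyRange ((a + d : Nat) : Int) ((a : Nat) : Int) (-1)).foldl
        (fun s i => PySem.List.pySetD s i (PySem.List.pyGetD s (i - 1) default)) xs
      = xs.take (a + 1) ++ (xs.drop a).take d ++ xs.drop (a + d + 1) := by
  induction d with
  | zero => intro xs a hd _; omega
  | succ d ih =>
    intro xs a _ hlen
    have hb : (a : Int) < ((a + (d + 1) : Nat) : Int) := by push_cast; omega
    rw [PySem.List.pyRange_neg_one_cons hb, List.foldl_cons]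
    have hstep : (PySem.List.pySetD xs ((a + (d + 1) : Nat) : Int)
          (PySem.List.pyGetD xs (((a + (d + 1) : Nat) : Int) - 1) default))
        = xs.set (a + d + 1) (xs.getD (a + d) default) := by
      have : (((a + (d + 1) : Nat) : Int) - 1) = ((a + d : Nat) : Int) := by push_cast; omega
      rw [this, PySem.List.pyGetD_natCast, PySem.List.pySetD_natCast]
      rfl
    rw [hstep]
    set ys := xs.set (a + d + 1) (xs.getD (a + d) default) with hys
    rcases Nat.eq_zero_or_pos d with hd0 | hd0
    · -- base: the range is the single index a+1
      subst hd0
      rw [PySem.List.pyRange_neg_one_eq_nil (by push_cast; omega)]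
      simp only [List.foldl_nil]
      rw [hys, List.set_eq_take_append_cons_drop, if_pos (by omega)]
      have h1 : (xs.drop a).take 1 = [xs.getD a default] := by
        have haux : a < xs.length := by omega
        rw [List.getD_eq_getElem xs default haux]
        rw [List.take_one, List.head?_drop, List.getElem?_eq_getElem haux]
        rfl
      simp [h1]
    · -- inductive step
      have hcast : ((a + (d + 1) : Nat) : Int) - 1 = ((a + d : Nat) : Int) := by push_cast; omega
      have hylen : ys.length = xs.length := by rw [hys]; simp
      have := ih ys a hd0 (by omega)
      rw [hcast, this]
      -- rewrite the pieces of ys back in terms of xs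
      have hy : ys = xs.take (a + d + 1) ++ xs.getD (a + d) default :: xs.drop (a + d + 2) := by
        rw [hys, List.set_eq_take_append_cons_drop, if_pos (by omega)]
      have p1 : ys.take (a + 1) = xs.take (a + 1) := by
        rw [hy, List.take_append_of_le_length (by simp; omega), List.take_take,
            Nat.min_eq_left (by omega)]
      have p2 : (ys.drop a).take d = (xs.drop a).take d := by
        rw [hy, List.drop_append_of_le_length (by simp; omega), List.take_append_of_le_length
              (by simp; omega)]
        rw [List.drop_take, List.take_take]
        congr 1
        omega
      have p3 : ys.drop (a + d + 1) = xs.getD (a + d) default :: xs.drop (a + d + 2) := by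
        rw [hy, List.drop_left' (by rw [List.length_take]; omega)]
      rw [p1, p2, p3]
      have p4 : (xs.drop a).take (d + 1) = (xs.drop a).take d ++ [xs.getD (a + d) default] := by
        rw [List.take_add_one]
        congr 1
        rw [List.getElem?_drop, List.getElem?_eq_getElem (by omega),
            List.getD_eq_getElem xs default (by omega)]
        rfl
      rw [p4]
      simp
      omega

-- A's whole per-list shift as a slice concatenation.
theorem shiftA_closed {α : Type} [Inhabited α] (xs : List α) (a b : Nat)
    (hab : a < b) (hb : b < xs.length) :
    pyShiftA xs (b : Int) (a : Int)
      = xs.take a ++ xs.getD b default :: ((xs.drop a).take (b - a) ++ xs.drop (b + 1)) := by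
  obtain ⟨d, rfl⟩ : ∃ d : Nat, b = a + d := ⟨b - a, by omega⟩
  unfold pyShiftA
  rw [PySem.List.pyGetD_natCast]
  rw [fold_shift_closed (α := α) d xs a (by omega) (by omega)]
  rw [PySem.List.pySetD_natCast]
  rw [List.append_assoc, List.set_append_left _ _ (by simp; omega)]
  have htk : xs.take (a + 1) = xs.take a ++ [xs.getD a default] := by
    rw [List.take_add_one, List.getElem?_eq_getElem (by omega),
        List.getD_eq_getElem xs default (by omega)]
    rfl
  rw [htk, List.set_append_right _ _ (by simp)]
  have hz : a - (xs.take a).length = 0 := by rw [List.length_take]; omega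
  rw [hz]
  have hda : a + d - a = d := by omega
  simp [hda]

-- srcIdx on nonnegative in-range arguments, as a Nat.
theorem srcIdx_natCast (a b j : Nat) (hab : a < b) :
    srcIdx (b : Int) (a : Int) (j : Int)
      = ((if j = a then b else if a < j ∧ j ≤ b then j - 1 else j : Nat) : Int) := by
  unfold srcIdx
  split_ifs <;> omega

-- B's per-list comprehension equals the same slice concatenation.
theorem perm_closed {α : Type} [Inhabited α] (xs : List α) (a b : Nat)
    (hab : a < b) (hb : b < xs.length) :
    (PySem.List.pyRange 0 (xs.length : Int) 1).map
        (fun j => PySem.List.pyGetD xs (srcIdx (b : Int) (a : Int) j) default)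
      = xs.take a ++ xs.getD b default :: ((xs.drop a).take (b - a) ++ xs.drop (b + 1)) := by
  rw [PySem.List.pyRange_zero_natCast]
  rw [List.map_map]
  apply List.ext_getElem
  · simp only [List.length_map, List.length_range, List.length_append, List.length_take,
      List.length_cons, List.length_drop]
    omega
  · intro j hj1 hj2
    simp only [List.length_map, List.length_range] at hj1
    rw [List.getElem_map, List.getElem_range]
    simp only [Function.comp]
    rw [srcIdx_natCast a b j hab, PySem.List.pyGetD_natCast]
    apply Option.some.inj
    rw [← List.getElem?_eq_getElem]
    by_cases hja : j = a
    · rw [if_pos hja, List.getElem?_append_right (by simp only [List.length_take]; omega)]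
      have hidx : j - (xs.take a).length = 0 := by simp only [List.length_take]; omega
      rw [hidx, List.getElem?_cons_zero]
    · rw [if_neg hja]
      by_cases hjb : a < j ∧ j ≤ b
      · rw [if_pos hjb, List.getElem?_append_right (by simp only [List.length_take]; omega)]
        have hidx : j - (xs.take a).length = (j - a - 1) + 1 := by
          simp only [List.length_take]; omega
        rw [hidx, List.getElem?_cons_succ,
            List.getElem?_append_left (by simp only [List.length_take, List.length_drop]; omega),
            List.getElem?_take, if_pos (by omega), List.getElem?_drop]
        have e : a + (j - a - 1) = j - 1 := by omega
        rw [e, List.getElem?_eq_getElem (by omega), List.getD_eq_getElem xs default (by omega)]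
      · rw [if_neg hjb]
        have hgt : b < j ∨ j < a := by omega
        rcases hgt with hgt | hlt
        · rw [List.getElem?_append_right (by simp only [List.length_take]; omega)]
          have hidx : j - (xs.take a).length = (j - a - 1) + 1 := by
            simp only [List.length_take]; omega
          rw [hidx, List.getElem?_cons_succ,
              List.getElem?_append_right (by simp only [List.length_take, List.length_drop]; omega),
              List.getElem?_drop]
          have e : b + 1 + (j - a - 1 - (b - a)) = j := by omega
          have hlen : ((xs.drop a).take (b - a)).length = b - a := by
            simp only [List.length_take, List.length_drop]
            omega
          rw [hlen, e, List.getElem?_eq_getElem (by omega),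
              List.getD_eq_getElem xs default (by omega)]
        · rw [List.getElem?_append_left (by simp only [List.length_take]; omega),
              List.getElem?_take, if_pos (by omega),
              List.getElem?_eq_getElem (by omega), List.getD_eq_getElem xs default (by omega)]

-- the core agreement for one list
theorem shift_eq_perm {α : Type} [Inhabited α] (xs : List α) (a b : Nat)
    (hab : a < b) (hb : b < xs.length) :
    pyShiftA xs (b : Int) (a : Int)
      = (PySem.List.pyRange 0 (xs.length : Int) 1).map
          (fun j => PySem.List.pyGetD xs (srcIdx (b : Int) (a : Int) j) default) := by
  rw [shiftA_closed xs a b hab hb, perm_closed xs a b hab hb]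

-- ===== VERDICT (by name: the statement is the Claim_ definition above) =====
theorem relocateState_spec : Claim_equal_relocateState := by
  intro m i0 iNew _ hpre
  obtain ⟨h0, h1, h2, hrows⟩ := hpre
  obtain ⟨a, rfl⟩ : ∃ a : Nat, iNew = (a : Int) := ⟨iNew.toNat, by omega⟩
  obtain ⟨b, rfl⟩ : ∃ b : Nat, i0 = (b : Int) := ⟨i0.toNat, by omega⟩
  have hab : a < b := by exact_mod_cast h1
  have hblen : b < m.length := by exact_mod_cast h2
  unfold Spec_relocateState relocateState relocateState_alt
  rw [shift_eq_perm m a b hab hblen, List.map_map]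
  apply List.map_congr_left
  intro j hj
  have hj' : 0 ≤ j ∧ j < (m.length : Int) := by
    rwa [PySem.List.mem_pyRange_one] at hj
  obtain ⟨k, rfl⟩ : ∃ k : Nat, j = (k : Int) := ⟨j.toNat, by omega⟩
  have hk : k < m.length := by exact_mod_cast hj'.2
  simp only [Function.comp]
  have hde : (default : List Int) = [] := rfl
  rw [hde, srcIdx_natCast a b k hab, PySem.List.pyGetD_natCast]
  set t : Nat := if k = a then b else if a < k ∧ k ≤ b then k - 1 else k with ht
  have htlen : t < m.length := by
    rw [ht]; split_ifs <;> omega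
  rw [List.getD_eq_getElem m [] htlen]
  have hmem : m[t] ∈ m := List.getElem_mem htlen
  have hrlen : b < m[t].length := by
    have := hrows m[t] hmem
    exact_mod_cast this
  rw [shift_eq_perm m[t] a b hab hrlen]
  rfl
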